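-- pv_equiv track=rewrite | github.com/limsubinn/Algorithm | Programmers/72410.py | solution
-- ===== SOURCE A (Python) =====
-- def solution(new_id):
--     # 1단계 -> 소문자 만들기
--     new_id = new_id.lower()
--
--     # 2단계 -> 예외 문자 제거
--     exc = '~!@#$%^&*()=+[{]}:?,<>/'
--     for i in exc:
--         if i in new_id:
--             new_id = new_id.replace(i, '')
--
--     # 3단계 -> 연속 . 제거
--     ### 내 코드
--     i = 1
--     while True:
--         if len(new_id) < 2:
--             break
--         if new_id[i-1] == '.' and new_id[i] == '.':
--             new_id = new_id[:i-1] + new_id[i:]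
--         else:
--             i += 1
--         if i >= len(new_id):
--             break
--     ### 참고 코드
--     # while '..' in new_id:
--     #     new_id = new_id.replace('..', '.')
--
--     # 4단계 -> 처음과 끝의 . 제거
--     new_id = new_id.strip('.')
--
--     # 5단계 -> 빈 문자열에 a 대입
--     if len(new_id) == 0:
--         new_id = 'a'
--
--     # 6단계 -> 길이 15자 이후 제거 & 끝의 . 제거
--     new_id = new_id[0:15].rstrip('.')
--
--     # 7단계 -> 길이 2자 이하일 때 마지막 문자를 길이가 3이 될 때까지 반복해서 붙이기
--     while True:
--         if len(new_id) > 2: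
--             break
--         new_id = new_id + new_id[-1]
--
--     return new_id
-- ===== SOURCE B (Python) =====
-- def solution(new_id):
--     exc = '~!@#$%^&*()=+[{]}:?,<>/'
--     out = []
--     prev = ''
--     for ch in new_id.lower():
--         if ch in exc:
--             continue
--         if ch == '.' and prev == '.':
--             continue
--         out.append(ch)
--         prev = ch
--     s = ''.join(out).strip('.')
--     if not s:
--         s = 'a'
--     s = s[0:15].rstrip('.')
--     if len(s) < 3:
--         s += s[-1] * (3 - len(s))
--     return s
-- ===== Notes on version B (the rewrite author's own statement) =====
-- stated objective: faster
-- what changed: A lower-cases, then runs 23 full-string replace passes for the forbidden characters, then collapses consecutive dots by repeated in-place deletion in a quadratic while-loop; B does filtering and dot-run collapsing in one single pass that tracks the last kept character, then applies the same strip/truncate/pad finishing steps (padding via a closed-form repeat instead of a loop).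
import Mathlib
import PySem

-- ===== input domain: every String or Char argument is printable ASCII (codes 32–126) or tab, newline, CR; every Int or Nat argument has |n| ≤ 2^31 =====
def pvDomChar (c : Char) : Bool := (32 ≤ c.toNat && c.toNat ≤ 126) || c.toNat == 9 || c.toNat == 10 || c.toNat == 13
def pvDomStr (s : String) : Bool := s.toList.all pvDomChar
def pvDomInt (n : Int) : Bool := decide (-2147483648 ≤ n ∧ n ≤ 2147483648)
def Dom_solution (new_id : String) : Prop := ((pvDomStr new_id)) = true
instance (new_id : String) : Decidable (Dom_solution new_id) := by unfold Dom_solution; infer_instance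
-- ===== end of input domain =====

-- B replaces A's 23 replace passes + in-place double-dot deletion loop by one single pass tracking
-- the last kept character (objective: faster).

-- ===== PORT A =====

-- exc = '~!@#$%^&*()=+[{]}:?,<>/'
def pvExc : List Char := "~!@#$%^&*()=+[{]}:?,<>/".toList

-- step-3 while-loop of A: i starts at 1; delete new_id[i-1] when new_id[i-1] and new_id[i]
-- are both dots, else i += 1.  '1 ≤ i' in the condition is a totality guard only (1 ≤ i holds
-- at every actual call); the indexing new_id[i-1], new_id[i] is in range at every reachable
-- state, ported with a default that is never read; new_id[:i-1] + new_id[i:] is take/drop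
-- since 1 ≤ i.
def pvDotLoop (s : List Char) (i : Nat) : List Char :=
  if s.length < 2 then s
  else if 1 ≤ i ∧ PySem.List.pyGetD s ((i : Int) - 1) ' ' = '.' ∧ PySem.List.pyGetD s (i : Int) ' ' = '.' then
    let s' := s.take (i - 1) ++ s.drop i
    if h' : s'.length ≤ i then s' else pvDotLoop s' i
  else
    if h'' : s.length ≤ i + 1 then s else pvDotLoop s (i + 1)
termination_by 2 * s.length - i
decreasing_by
  · simp only [s', List.length_append, List.length_take, List.length_drop] at h' ⊢
    omega
  · omega

-- step-7 while-loop of A: append the last character until the length exceeds 2.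
-- (on [] Python's new_id[-1] would raise IndexError; that state is unreachable — the
-- argument is nonempty at the call — and the port returns [] there.)
def pvPadA : List Char → List Char
  | [] => []
  | x :: xs =>
    if h : 2 < (x :: xs).length then x :: xs
    else pvPadA ((x :: xs) ++ [(x :: xs).getLast (List.cons_ne_nil x xs)])
termination_by l => 3 - l.length
decreasing_by simp at h ⊢; omega

-- A: lower; 23 guarded replace passes; in-place dot-deletion loop; strip('.');
-- 'a' if empty; [0:15].rstrip('.'); pad to length 3.
def solution (new_id : String) : String :=
  let s1 := PySem.Chars.lower new_id.toList
  let s2 := pvExc.foldl (fun s c =>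
      if PySem.Chars.isIn [c] s then PySem.Chars.replace s [c] [] else s) s1
  let s3 := pvDotLoop s2 1
  let s4 := PySem.Chars.stripChars s3 ['.']
  let s5 := if s4.length = 0 then ['a'] else s4
  -- new_id[0:15].rstrip('.')  (rstrip with an explicit char set, ported by hand, exact)
  let s6 := ((PySem.List.slice s5 (some 0) (some 15)).reverse.dropWhile (· == '.')).reverse
  String.ofList (pvPadA s6)

-- ===== PORT B =====

-- B's single pass: drop forbidden characters, and drop a '.' whenever the last KEPT
-- character (prev) is also '.'; everything else is appended and becomes the new prev.
def pvGoB (prev : Option Char) : List Char → List Char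
  | [] => []
  | c :: cs =>
    if c ∈ pvExc then pvGoB prev cs
    else if c = '.' ∧ prev = some '.' then pvGoB prev cs
    else c :: pvGoB (some c) cs

-- B: one fused pass, then the same finishing steps, with the final padding as a
-- closed-form repeat of the last character instead of a loop.
def solution_alt (new_id : String) : String :=
  let s := pvGoB none (PySem.Chars.lower new_id.toList)
  let s4 := PySem.Chars.stripChars s ['.']
  let s5 := if s4.length = 0 then ['a'] else s4
  let s6 := ((PySem.List.slice s5 (some 0) (some 15)).reverse.dropWhile (· == '.')).reverse
  let s7 := if s6.length < 3 then
      match s6.getLast? with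
      | none => s6        -- s[-1] raises on []; unreachable, s6 is nonempty here
      | some c => s6 ++ List.replicate (3 - s6.length) c
    else s6
  String.ofList s7

-- ===== PRECONDITION & SPEC =====
def Spec_solution (new_id : String) (out : String) : Prop := out = solution_alt new_id
instance (new_id : String) (out : String) : Decidable (Spec_solution new_id out) := by unfold Spec_solution; infer_instance

-- ===== CLAIM (what is proved, stated in full; the proofs are below) =====
def Claim_equal_solution : Prop := ∀ (new_id : String), Dom_solution new_id → Spec_solution new_id (solution new_id)

-- ===== LEMMAS AND PROOFS =====

-- pure dot-collapse (no character filtering), with the previous kept character as context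
def pvCol (prev : Option Char) : List Char → List Char
  | [] => []
  | c :: cs => if c = '.' ∧ prev = some '.' then pvCol prev cs else c :: pvCol (some c) cs

-- s.replace(c, '') is a filter
lemma pvReplaceGo_single (c : Char) :
    ∀ (fuel : Nat) (l acc : List Char), l.length ≤ fuel →
      PySem.Chars.replace.go [c] [] fuel l acc = acc.reverse ++ l.filter (fun x => x ≠ c) := by
  intro fuel
  induction fuel with
  | zero =>
    intro l acc h
    have : l = [] := List.length_eq_zero_iff.mp (Nat.le_zero.mp h)
    subst this
    simp [PySem.Chars.replace.go]
  | succ n ih =>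
    intro l acc h
    match l with
    | [] => simp [PySem.Chars.replace.go]
    | x :: t =>
      rw [PySem.Chars.replace.go]
      by_cases hx : x = c
      · subst hx
        simp only [List.isPrefixOf, BEq.rfl, Bool.and_self, if_pos]
        rw [ih _ _ (by simp at h ⊢; omega)]
        simp
      · have : ([c].isPrefixOf (x :: t)) = false := by
          simp [List.isPrefixOf]; exact fun hh => absurd hh.symm hx
        rw [this]
        simp only [Bool.false_eq_true, if_false]
        rw [ih _ _ (by simp at h ⊢; omega)]
        simp [hx]

lemma pvReplace_single (c : Char) (s : List Char) :
    PySem.Chars.replace s [c] [] = s.filter (fun x => x ≠ c) := by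
  rw [PySem.Chars.replace]
  simp only [List.isEmpty_cons, Bool.false_eq_true, if_false]
  simpa using pvReplaceGo_single c s.length s [] le_rfl

-- A's guarded replace fold over a list of characters is a single filter
lemma pvFoldReplace (l : List Char) : ∀ (s : List Char),
    l.foldl (fun s c => if PySem.Chars.isIn [c] s then PySem.Chars.replace s [c] [] else s) s
      = s.filter (fun x => !(l.contains x)) := by
  induction l with
  | nil => intro s; simp
  | cons c t ih =>
    intro s
    have hstep : (if PySem.Chars.isIn [c] s then PySem.Chars.replace s [c] [] else s)
        = s.filter (fun x => x ≠ c) := by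
      by_cases hin : PySem.Chars.isIn [c] s
      · rw [if_pos hin, pvReplace_single]
      · rw [if_neg hin]
        have hmem : c ∉ s := by
          have h1 := PySem.Chars.isIn_iff_infix (sub := [c]) (s := s)
          rw [Bool.eq_false_iff.mpr hin] at h1
          simp at h1
          exact fun hc => h1 ((List.singleton_infix_iff c s).mpr hc)
        refine (List.filter_eq_self.mpr ?_).symm
        intro a ha
        simp only [ne_eq, decide_eq_true_eq]
        exact fun he => hmem (he ▸ ha)
    rw [List.foldl_cons, hstep, ih, List.filter_filter]
    apply List.filter_congr
    intro a _
    simp only [List.contains_cons, Bool.not_or]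
    cases h : a == c <;> simp_all [Bool.and_comm]

lemma pvGetD_at (pre t : List Char) (p : Char) :
    PySem.List.pyGetD (pre ++ p :: t) ((pre.length : Int)) ' ' = p := by
  rw [PySem.List.pyGetD_natCast]
  simp [List.getD]

-- A's dot loop computes the pure collapse of everything right of position i-1
lemma pvDotLoop_eq (rest : List Char) : ∀ (pre : List Char) (prev : Char), rest ≠ [] →
    pvDotLoop (pre ++ prev :: rest) (pre.length + 1) = pre ++ prev :: pvCol (some prev) rest := by
  induction rest with
  | nil => intro _ _ h; exact absurd rfl h
  | cons c rest' ih =>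
    intro pre prev _
    rw [pvDotLoop]
    have hlen : (pre ++ prev :: c :: rest').length = pre.length + 2 + rest'.length := by
      simp; omega
    rw [if_neg (by omega)]
    have hg1 : PySem.List.pyGetD (pre ++ prev :: c :: rest') ((↑(pre.length + 1) : Int) - 1) ' ' = prev := by
      have h0 : ((↑(pre.length + 1) : Int) - 1) = (pre.length : Int) := by push_cast; ring
      rw [h0]; exact pvGetD_at pre _ prev
    have hg2 : PySem.List.pyGetD (pre ++ prev :: c :: rest') ((↑(pre.length + 1) : Int)) ' ' = c := by
      have h0 : ((↑(pre.length + 1) : Int)) = (((pre ++ [prev]).length : Int)) := by simp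
      rw [h0]
      have h1 := pvGetD_at (pre ++ [prev]) rest' c
      simpa using h1
    by_cases hd : prev = '.' ∧ c = '.'
    · rw [if_pos ⟨by omega, by rw [hg1, hd.1], by rw [hg2, hd.2]⟩]
      have htd : (pre ++ prev :: c :: rest').take (pre.length + 1 - 1) ++ (pre ++ prev :: c :: rest').drop (pre.length + 1)
          = pre ++ c :: rest' := by
        simp [List.drop_append]
      simp only [htd]
      by_cases hr : rest' = []
      · subst hr
        rw [dif_pos (by simp)]
        simp [pvCol, hd.1, hd.2]
      · rw [dif_neg (by have := List.length_pos_iff.mpr hr; simp; omega)]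
        rw [ih pre c hr]
        have h2 : pvCol (some prev) (c :: rest') = pvCol (some c) rest' := by
          rw [pvCol, if_pos ⟨hd.2, by rw [hd.1]⟩, hd.1, ← hd.2]
        rw [h2, hd.1, hd.2]
    · rw [if_neg (by rw [hg1, hg2]; intro ⟨_, h1, h2⟩; exact hd ⟨h1, h2⟩)]
      by_cases hr : rest' = []
      · subst hr
        rw [dif_pos (by simp)]
        have h2 : pvCol (some prev) [c] = [c] := by
          rw [pvCol, if_neg (fun ⟨h1, h2⟩ => hd ⟨by injection h2, h1⟩)]
          rw [pvCol]
        rw [h2]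
      · rw [dif_neg (by have := List.length_pos_iff.mpr hr; simp; omega)]
        have hsh : pre ++ prev :: c :: rest' = (pre ++ [prev]) ++ c :: rest' := by simp
        have hi2 : pre.length + 1 + 1 = (pre ++ [prev]).length + 1 := by simp
        rw [hsh, hi2, ih (pre ++ [prev]) c hr]
        have h2 : pvCol (some prev) (c :: rest') = c :: pvCol (some c) rest' := by
          rw [pvCol, if_neg (fun ⟨h1, h2⟩ => hd ⟨by injection h2, h1⟩)]
        rw [h2]; simp

lemma pvDotLoop_one (s : List Char) : pvDotLoop s 1 = pvCol none s := by
  match s with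
  | [] => rw [pvDotLoop, if_pos (by simp)]; rw [pvCol]
  | [x] => rw [pvDotLoop, if_pos (by simp)]; rw [pvCol, if_neg (by simp), pvCol]
  | x :: y :: t =>
    have h := pvDotLoop_eq (y :: t) [] x (by simp)
    simp only [List.nil_append, List.length_nil] at h
    rw [h]
    conv_rhs => rw [pvCol]
    simp

-- B's fused pass = filter then collapse
lemma pvGoB_eq (l : List Char) : ∀ (prev : Option Char),
    pvGoB prev l = pvCol prev (l.filter (fun x => !(pvExc.contains x))) := by
  induction l with
  | nil => intro prev; simp [pvGoB, pvCol]
  | cons c t ih =>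
    intro prev
    by_cases hc : c ∈ pvExc
    · simp [pvGoB, hc, ih]
    · simp only [pvGoB, if_neg hc, List.filter_cons,
        (by simp [hc] : (!(pvExc.contains c)) = true), if_pos]
      by_cases hd : c = '.' ∧ prev = some '.'
      · simp [pvCol, hd, ih]
      · simp [pvCol, hd, ih]

-- A's padding loop = B's closed-form padding
lemma pvPad_eq (s : List Char) :
    pvPadA s = (if s.length < 3 then
      match s.getLast? with
      | none => s
      | some c => s ++ List.replicate (3 - s.length) c
    else s) := by
  match s with
  | [] => rw [pvPadA]; simp
  | [a] =>
    rw [pvPadA]; simp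
    rw [pvPadA]; simp
    rw [pvPadA]; simp
  | [a, b] =>
    rw [pvPadA]; simp
    rw [pvPadA]; simp
  | a :: b :: c :: t =>
    rw [pvPadA]
    simp

-- ===== VERDICT (by name: the statement is the Claim_ definition above) =====
theorem solution_spec : Claim_equal_solution := by
  intro new_id _
  unfold Spec_solution solution solution_alt
  simp only [pvDotLoop_one, pvFoldReplace, pvGoB_eq, pvPad_eq]
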